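-- pv_equiv track=rewrite | github.com/syedbasitahmad/260756_daily_commit | replace_first_string.py | replace_repeated
-- ===== SOURCE A (Python) =====
-- def replace_repeated(c):
--     hash = dict()
--     c= list(c)
--     for i in range(len(c)):
--         if c[i] not in hash.keys():
--             hash[c[i]] = 1
--         else:
--             c[i] = "$"
--     return "".join(c)
-- ===== SOURCE B (Python) =====
-- def replace_repeated(c):
--     lst = list(c)
--     first = {}
--     for i, ch in enumerate(lst):
--         first.setdefault(ch, i)
--     return "".join(ch if first[ch] == i else "$" for i, ch in enumerate(lst))
-- ===== Notes on version B (the rewrite author's own statement) =====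
-- stated objective: alternative
-- what changed: B is a two-stage algorithm: a first pass builds a table mapping each character to the index of its first occurrence, then a second positional pass emits the character exactly when its first-occurrence index equals the current position; A instead makes one incremental pass mutating the list while growing a seen-set.
import Mathlib
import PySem

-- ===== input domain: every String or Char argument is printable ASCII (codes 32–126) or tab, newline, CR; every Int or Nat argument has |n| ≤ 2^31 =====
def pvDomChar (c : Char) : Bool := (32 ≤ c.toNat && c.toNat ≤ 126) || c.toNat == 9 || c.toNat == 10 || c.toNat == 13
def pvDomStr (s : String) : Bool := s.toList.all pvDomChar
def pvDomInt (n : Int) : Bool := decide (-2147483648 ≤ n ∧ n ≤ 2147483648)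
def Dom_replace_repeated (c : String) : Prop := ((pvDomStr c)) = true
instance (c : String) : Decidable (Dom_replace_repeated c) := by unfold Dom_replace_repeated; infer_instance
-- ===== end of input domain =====

-- B replaces A's incremental seen-set pass by a two-stage algorithm: a first-occurrence-index
-- table built up front, then a positional pass comparing each index against that table.
-- ===== PORT A =====
def replace_repeated (c : String) : String :=
  let cl := c.toList
  let st := cl.foldl
    (fun (st : PySem.Dict Char Int × List Char) ch =>
      if ch ∈ st.1.keys then (st.1, st.2 ++ ['$'])
      else (st.1.insert ch 1, st.2 ++ [ch]))
    (PySem.Dict.empty, [])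
  String.ofList st.2

-- ===== PORT B =====
def replace_repeated_alt (c : String) : String :=
  let lst := c.toList
  let first := (PySem.List.enumerate lst 0).foldl
    (fun (d : PySem.Dict Char Int) p => d.setdefault p.2 p.1) PySem.Dict.empty
  String.ofList ((PySem.List.enumerate lst 0).map
    (fun p => if first.getD p.2 (-1) = p.1 then p.2 else '$'))

-- ===== PRECONDITION & SPEC =====
def Spec_replace_repeated (c : String) (out : String) : Prop := out = replace_repeated_alt c
instance (c : String) (out : String) : Decidable (Spec_replace_repeated c out) := by unfold Spec_replace_repeated; infer_instance

-- ===== CLAIM (what is proved, stated in full; the proofs are below) =====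
def Claim_equal_replace_repeated : Prop := ∀ (c : String), Dom_replace_repeated c → Spec_replace_repeated c (replace_repeated c)

-- ===== LEMMAS AND PROOFS =====

-- canonical form: each char of l becomes '$' iff it already occurred in the prefix `pre`
def pvCore (pre l : List Char) : List Char :=
  match l with
  | [] => []
  | ch :: t => (if ch ∈ pre then '$' else ch) :: pvCore (pre ++ [ch]) t

theorem pvFoldA_eq_core (l : List Char) : ∀ (d : PySem.Dict Char Int) (acc pre : List Char),
    (∀ ch, ch ∈ d.keys ↔ ch ∈ pre) →
    (l.foldl
      (fun (st : PySem.Dict Char Int × List Char) ch =>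
        if ch ∈ st.1.keys then (st.1, st.2 ++ ['$'])
        else (st.1.insert ch 1, st.2 ++ [ch]))
      (d, acc)).2 = acc ++ pvCore pre l := by
  induction l with
  | nil => intro d acc pre _; simp [pvCore]
  | cons ch t ih =>
    intro d acc pre hinv
    simp only [List.foldl, pvCore]
    by_cases h : ch ∈ pre
    · rw [if_pos ((hinv ch).mpr h), if_pos h,
        ih d (acc ++ ['$']) (pre ++ [ch])
          (fun x => by
            simp only [hinv x, List.mem_append, List.mem_singleton]
            exact ⟨Or.inl, fun hx => hx.elim id (fun e => e ▸ h)⟩)]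
      simp
    · rw [if_neg (fun hk => h ((hinv ch).mp hk)), if_neg h,
        ih (d.insert ch 1) (acc ++ [ch]) (pre ++ [ch])
          (fun x => by
            simp only [PySem.Dict.mem_keys_insert, hinv x, List.mem_append,
              List.mem_singleton]
            tauto)]
      simp

theorem pvSetdefault_eq (d : PySem.Dict Char Int) (k : Char) (v : Int) :
    d.setdefault k v = if d.contains k then d else d.insert k v := by
  by_cases hc : d.contains k = true
  · simp [PySem.Dict.setdefault, hc]
  · rw [if_neg hc]
    apply PySem.Dict.ext
    rw [PySem.Dict.items_insert_of_not_contains d v (by simpa using hc)]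
    simp [PySem.Dict.setdefault, hc]

theorem pvBuild (l : List Char) : ∀ (k : Int) (d : PySem.Dict Char Int) (x : Char),
    ((PySem.List.enumerate l k).foldl
      (fun (d : PySem.Dict Char Int) p => d.setdefault p.2 p.1) d).get? x =
      (d.get? x).or (Option.map (fun (j : Nat) => k + (j : Int)) (List.idxOf? x l)) := by
  induction l with
  | nil => intro k d x; simp [PySem.List.enumerate_nil]
  | cons ch t ih =>
    intro k d x
    simp only [PySem.List.enumerate_cons, List.foldl_cons]
    rw [pvSetdefault_eq]
    by_cases hc : d.contains ch = true
    · rw [if_pos hc, ih]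
      by_cases hx : x = ch
      · subst hx
        obtain ⟨v, hv⟩ := Option.isSome_iff_exists.mp
          (show (d.get? x).isSome = true by
            rw [← PySem.Dict.contains_eq_isSome_get?]; exact hc)
        rw [hv]
        simp [Option.some_or]
      · have hcx : ¬ ch = x := fun h => hx h.symm
        have hidx : List.idxOf? x (ch :: t) = (List.idxOf? x t).map (· + 1) := by
          simp [List.idxOf?_cons, hcx]
        rw [hidx]
        rcases List.idxOf? x t with _ | j
        · simp
        · simp only [Option.map_some]
          rw [show k + 1 + (j : Int) = k + ((j + 1 : Nat) : Int) by push_cast; ring]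
    · rw [if_neg hc, ih]
      by_cases hx : x = ch
      · subst hx
        rw [PySem.Dict.get?_insert_self,
          (PySem.Dict.get?_eq_none_iff_contains d x).mpr (by simpa using hc)]
        simp [List.idxOf?_cons]
      · rw [PySem.Dict.get?_insert_of_ne d k hx]
        have hcx : ¬ ch = x := fun h => hx h.symm
        have hidx : List.idxOf? x (ch :: t) = (List.idxOf? x t).map (· + 1) := by
          simp [List.idxOf?_cons, hcx]
        rw [hidx]
        rcases List.idxOf? x t with _ | j
        · simp
        · simp only [Option.map_some]
          rw [show k + 1 + (j : Int) = k + ((j + 1 : Nat) : Int) by push_cast; ring]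

theorem pvEmit (cl : List Char) (F : PySem.Dict Char Int)
    (hF : ∀ x, F.get? x = Option.map (fun (j : Nat) => (j : Int)) (List.idxOf? x cl)) :
    ∀ (l pre : List Char), pre ++ l = cl →
    (PySem.List.enumerate l (pre.length : Int)).map
      (fun p => if F.getD p.2 (-1) = p.1 then p.2 else '$') = pvCore pre l := by
  intro l
  induction l with
  | nil => intro pre _; simp [PySem.List.enumerate_nil, pvCore]
  | cons ch t ih =>
    intro pre hcl
    subst hcl
    rw [PySem.List.enumerate_cons, List.map_cons, pvCore]
    have hclp : (pre ++ ch :: t)[pre.length]'(by simp) = ch := by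
      rw [List.getElem_append_right (Nat.le_refl _)]
      simp
    obtain ⟨j, hj⟩ := Option.isSome_iff_exists.mp
      (List.isSome_idxOf?.mpr (show ch ∈ pre ++ ch :: t by simp))
    obtain ⟨hjlt, hget, hmin⟩ := List.idxOf?_eq_some_iff.mp hj
    have hgetD : F.getD ch (-1) = (j : Int) := by
      rw [PySem.Dict.getD_eq_get?_getD, hF ch, hj]
      rfl
    have htail : (PySem.List.enumerate t ((pre.length : Int) + 1)).map
        (fun p => if F.getD p.2 (-1) = p.1 then p.2 else '$') = pvCore (pre ++ [ch]) t := by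
      have h1 := ih (pre ++ [ch]) (by simp)
      have h2 : (((pre ++ [ch]).length : Nat) : Int) = (pre.length : Int) + 1 := by
        push_cast [List.length_append, List.length_cons, List.length_nil]
        ring
      rwa [h2] at h1
    by_cases h : ch ∈ pre
    · -- first occurrence lies strictly inside pre, so the index test fails
      obtain ⟨i0, hi0, hpre⟩ := List.mem_iff_getElem.mp h
      have hcli0 : (pre ++ ch :: t)[i0]'(by simp; omega) = ch :=
        (List.getElem_append_left hi0).trans hpre
      have hjle : j ≤ i0 := by
        by_contra hlt
        exact hmin i0 (by omega) hcli0
      have hne : ¬ (F.getD ch (-1) = ((pre.length : Nat) : Int)) := by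
        rw [hgetD]
        intro he
        have : j = pre.length := by exact_mod_cast he
        omega
      rw [if_neg hne, if_pos h, htail]
    · -- ch unseen in pre: its first occurrence is exactly index pre.length
      have hjpre : j = pre.length := by
        rcases Nat.lt_trichotomy j pre.length with hlt | he | hgt
        · exfalso
          have hpj : pre[j]'hlt = ch := (List.getElem_append_left hlt).symm.trans hget
          exact h (hpj ▸ List.getElem_mem hlt)
        · exact he
        · exact absurd hclp (hmin pre.length hgt)
      rw [if_pos (by rw [hgetD, hjpre]), if_neg h, htail]

-- ===== VERDICT (by name: the statement is the Claim_ definition above) =====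
theorem replace_repeated_spec : Claim_equal_replace_repeated := by
  intro c _
  unfold Spec_replace_repeated replace_repeated replace_repeated_alt
  simp only []
  rw [pvFoldA_eq_core c.toList PySem.Dict.empty [] [] (by simp [PySem.Dict.keys_empty])]
  have hF : ∀ x, ((PySem.List.enumerate c.toList 0).foldl
      (fun (d : PySem.Dict Char Int) p => d.setdefault p.2 p.1)
      PySem.Dict.empty).get? x =
      Option.map (fun (j : Nat) => (j : Int)) (List.idxOf? x c.toList) := by
    intro x
    rw [pvBuild c.toList 0 PySem.Dict.empty x]
    cases List.idxOf? x c.toList <;> simp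
  rw [show ((0 : Int) = ((List.length (α := Char) []) : Int)) by simp] at *
  rw [pvEmit c.toList _ hF c.toList [] rfl]
  simp
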